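-- pv_equiv track=rewrite | github.com/cyphou/Tableau-To-PowerBI | powerbi_import/m_validator.py | _check_quoted_identifiers
-- ===== SOURCE A (Python) =====
-- from typing import List
--
-- def _check_quoted_identifiers(text: str) -> List[str]:
--     """Detect unterminated `#"..."` quoted identifiers in the raw text."""
--     issues = []
--     i = 0
--     n = len(text)
--     while i < n - 1:
--         if text[i] == '#' and text[i + 1] == '"':
--             j = i + 2
--             closed = False
--             while j < n:
--                 if text[j] == '"':
--                     if j + 1 < n and text[j + 1] == '"':
--                         j += 2
--                         continue
--                     closed = True
--                     j += 1
--                     break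
--                 j += 1
--             if not closed:
--                 line_no = text[:i].count('\n') + 1
--                 issues.append(f'unterminated quoted identifier #"... at line {line_no}')
--             i = j
--         else:
--             i += 1
--     return issues
-- ===== SOURCE B (Python) =====
-- from typing import List
--
-- def _check_quoted_identifiers(text: str) -> List[str]:
--     """Single flat state-machine pass: track in_ident and a running line counter."""
--     in_ident = False
--     start_line = 1
--     line = 1
--     i = 0
--     n = len(text)
--     while i < n:
--         c = text[i]
--         if c == '\n':
--             line += 1
--         if not in_ident:
--             if c == '#' and i + 1 < n and text[i + 1] == '"':
--                 in_ident = True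
--                 start_line = line
--                 i += 2
--             else:
--                 i += 1
--         else:
--             if c == '"' and i + 1 < n and text[i + 1] == '"':
--                 i += 2
--             elif c == '"':
--                 in_ident = False
--                 i += 1
--             else:
--                 i += 1
--     if in_ident:
--         return [f'unterminated quoted identifier #"... at line {start_line}']
--     return []
-- ===== Notes on version B (the rewrite author's own statement) =====
-- stated objective: alternative
-- what changed: Replaced the nested outer-find/inner-scan index loops (with a slice-based newline count at report time) by a single flat state-machine pass with an explicit in_identifier flag and a running line counter.
import Mathlib
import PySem

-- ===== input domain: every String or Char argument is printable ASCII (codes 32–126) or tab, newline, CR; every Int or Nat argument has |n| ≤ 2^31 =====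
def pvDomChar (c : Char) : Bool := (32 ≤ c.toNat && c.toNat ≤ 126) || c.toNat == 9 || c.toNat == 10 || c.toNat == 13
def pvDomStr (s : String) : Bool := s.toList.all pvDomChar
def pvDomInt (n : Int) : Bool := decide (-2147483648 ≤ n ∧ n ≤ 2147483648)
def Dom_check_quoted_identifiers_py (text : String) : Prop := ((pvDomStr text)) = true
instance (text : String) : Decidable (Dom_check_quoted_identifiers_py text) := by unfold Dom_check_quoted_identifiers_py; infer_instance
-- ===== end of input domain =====

-- B replaces A's nested outer-find/inner-scan loops (with a slice newline count at report
-- time) by one flat state-machine pass with an in_identifier flag and a running line counter.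

-- shared message formatting (the f-string, identical in both Pythons)
def pvMsg (lineNo : Int) : String :=
  "unterminated quoted identifier #\"... at line " ++ PySem.Int.toStr lineNo

-- ===== PORT A =====
-- inner `while j < n` loop of A: returns (closed, j)
def aInner (cs : List Char) (n j : Nat) : Bool × Nat :=
  if _h : j < n then
    if cs[j]?.getD ' ' = '"' then
      if j + 1 < n ∧ cs[j + 1]?.getD ' ' = '"' then aInner cs n (j + 2)
      else (true, j + 1)
    else aInner cs n (j + 1)
  else (false, j)
termination_by n - j

-- (termination helper for aOuter: the inner loop never moves j backwards)
theorem aInner_snd_ge (cs : List Char) (n j : Nat) : j ≤ (aInner cs n j).2 := by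
  fun_induction aInner cs n j <;> (try simp_all) <;> omega

-- outer `while i < n - 1` loop of A (Nat `i + 1 < n` is exactly Python's `i < n - 1`);
-- text[:i].count('\n') ported as (cs.take i).count '\n' (exact: i ≥ 0, one-char needle)
def aOuter (cs : List Char) (n i : Nat) (issues : List String) : List String :=
  if _h : i + 1 < n then
    if cs[i]?.getD ' ' = '#' ∧ cs[i + 1]?.getD ' ' = '"' then
      let r := aInner cs n (i + 2)
      let issues' := if r.1 then issues
        else issues ++ [pvMsg (((cs.take i).count '\n' : Int) + 1)]
      aOuter cs n r.2 issues'
    else aOuter cs n (i + 1) issues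
  else issues
termination_by n - i
decreasing_by
  · have := aInner_snd_ge cs n (i + 2); omega
  · omega

def check_quoted_identifiers_py (text : String) : List String :=
  aOuter text.toList text.toList.length 0 []

-- ===== PORT B =====
-- the single `while i < n` state-machine loop of Source B
def bLoop (cs : List Char) (n i : Nat) (inId : Bool) (line startLine : Int) : List String :=
  if _h : i < n then
    let c := cs[i]?.getD ' '
    let line := if c = '\n' then line + 1 else line
    if inId then
      if c = '"' ∧ i + 1 < n ∧ cs[i + 1]?.getD ' ' = '"' then
        bLoop cs n (i + 2) true line startLine
      else if c = '"' then
        bLoop cs n (i + 1) false line startLine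
      else
        bLoop cs n (i + 1) true line startLine
    else
      if c = '#' ∧ i + 1 < n ∧ cs[i + 1]?.getD ' ' = '"' then
        bLoop cs n (i + 2) true line line
      else
        bLoop cs n (i + 1) false line startLine
  else
    if inId then [pvMsg startLine] else []
termination_by n - i

def check_quoted_identifiers_py_alt (text : String) : List String :=
  bLoop text.toList text.toList.length 0 false 1 1

-- ===== PRECONDITION & SPEC =====
def Spec_check_quoted_identifiers_py (text : String) (out : List String) : Prop := out = check_quoted_identifiers_py_alt text
instance (text : String) (out : List String) : Decidable (Spec_check_quoted_identifiers_py text out) := by unfold Spec_check_quoted_identifiers_py; infer_instance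

-- ===== CLAIM (what is proved, stated in full; the proofs are below) =====
def Claim_equal_check_quoted_identifiers_py : Prop := ∀ (text : String), Dom_check_quoted_identifiers_py text → Spec_check_quoted_identifiers_py text (check_quoted_identifiers_py text)

-- ===== LEMMAS AND PROOFS =====

-- running line number after i characters: newlines in text[:i], plus 1
def nl (cs : List Char) (i : Nat) : Int := ((cs.take i).count '\n' : Int) + 1

theorem nl_succ (cs : List Char) (i : Nat) (h : i < cs.length) :
    nl cs (i + 1) = nl cs i + (if cs[i]?.getD ' ' = '\n' then 1 else 0) := by
  unfold nl
  have ht : cs.take (i + 1) = cs.take i ++ [cs[i]] := by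
    rw [List.take_add_one, List.getElem?_eq_getElem h]; rfl
  rw [ht, List.count_append, List.getElem?_eq_getElem h]
  by_cases h1 : cs[i] = '\n' <;> simp [h1]

theorem bLoop_stop (cs : List Char) (n i : Nat) (line s : Int) (h : n ≤ i) :
    bLoop cs n i false line s = [] := by
  rw [bLoop]; simp [show ¬ i < n from by omega]

theorem aInner_unclosed_ge (cs : List Char) (n j : Nat)
    (h : (aInner cs n j).1 = false) : n ≤ (aInner cs n j).2 := by
  fun_induction aInner cs n j <;> simp_all

-- the inner scan of A versus B's in-identifier state
theorem inner_correspond (cs : List Char) (j : Nat) (s : Int) :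
    bLoop cs cs.length j true (nl cs j) s =
      (if (aInner cs cs.length j).1 then
        bLoop cs cs.length (aInner cs cs.length j).2 false (nl cs (aInner cs cs.length j).2) s
      else [pvMsg s]) := by
  fun_induction aInner cs cs.length j with
  | case1 j hj hq hesc ih =>
    have h2 : nl cs (j + 2) = nl cs j := by
      rw [nl_succ cs (j + 1) hesc.1, nl_succ cs j hj]; simp [hq, hesc.2]
    rw [bLoop]
    simp only [hj, dif_pos, hq, hesc.1, hesc.2, and_self, if_true]
    rw [← h2]
    simpa using ih
  | case2 j hj hq hesc =>
    have h1 : nl cs (j + 1) = nl cs j := by rw [nl_succ cs j hj]; simp [hq]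
    have hq' : cs[j] = '"' := by rw [List.getElem?_eq_getElem hj] at hq; simpa using hq
    rw [bLoop]
    simp [hj, hq', hesc, h1]
  | case3 j hj hq ih =>
    rw [bLoop]
    simp only [hj, dif_pos, hq, false_and, if_false, if_true]
    rw [show (if cs[j]?.getD ' ' = '\n' then nl cs j + 1 else nl cs j) = nl cs (j + 1) from by
      rw [nl_succ cs j hj]; split_ifs <;> omega]
    simpa [hq] using ih
  | case4 j hj =>
    rw [bLoop]
    simp [hj]

-- A's outer loop versus B outside the identifier state
theorem outer_correspond (cs : List Char) :
    ∀ k i s, cs.length - i ≤ k →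
      aOuter cs cs.length i [] = bLoop cs cs.length i false (nl cs i) s := by
  intro k
  induction k with
  | zero =>
    intro i s hk
    rw [aOuter, bLoop]
    simp [show ¬ (i + 1 < cs.length) from by omega, show ¬ (i < cs.length) from by omega]
  | succ k ih =>
    intro i s hk
    by_cases hi : i + 1 < cs.length
    · have hil : i < cs.length := by omega
      by_cases hop : cs[i]?.getD ' ' = '#' ∧ cs[i + 1]?.getD ' ' = '"'
      · -- opener found at i
        have hnl2 : nl cs (i + 2) = nl cs i := by
          rw [nl_succ cs (i + 1) hi, nl_succ cs i hil]; simp [hop.1, hop.2]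
        have hinner := inner_correspond cs (i + 2) (nl cs i)
        rw [hnl2] at hinner
        rw [aOuter, bLoop]
        simp only [hi, hil, dif_pos, hop, and_self, if_true]
        rw [show (if ('#' : Char) = '\n' then nl cs i + 1 else nl cs i) = nl cs i from by simp]
        rw [hinner]
        set r := aInner cs cs.length (i + 2) with hr
        by_cases hc : r.1
        · have hge : i + 2 ≤ r.2 := aInner_snd_ge cs cs.length (i + 2)
          simp only [hc, if_true]
          exact ih r.2 (nl cs i) (by omega)
        · have hge : cs.length ≤ r.2 := aInner_unclosed_ge cs cs.length (i + 2) (by simpa using hc)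
          simp only [hc, if_false, Bool.false_eq_true]
          rw [aOuter]
          simp [show ¬ (r.2 + 1 < cs.length) from by omega, nl]
      · -- no opener at i
        rw [aOuter, bLoop]
        simp only [hi, hil, dif_pos, hop, if_false, Bool.false_eq_true, true_and]
        rw [show (if cs[i]?.getD ' ' = '\n' then nl cs i + 1 else nl cs i) = nl cs (i + 1) from by
          rw [nl_succ cs i hil]; split_ifs <;> omega]
        exact ih (i + 1) s (by omega)
    · by_cases hil : i < cs.length
      · -- i = n - 1: A stops; B takes one harmless step then stops
        rw [aOuter, bLoop]
        simp only [hi, dif_neg, not_false_iff, hil, dif_pos, false_and, and_false, if_false,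
          Bool.false_eq_true]
        exact (bLoop_stop cs cs.length (i + 1) _ s (by omega)).symm
      · rw [aOuter, bLoop]
        simp [hi, hil]

-- ===== VERDICT (by name: the statement is the Claim_ definition above) =====
theorem check_quoted_identifiers_py_spec : Claim_equal_check_quoted_identifiers_py := by
  intro text _
  unfold Spec_check_quoted_identifiers_py check_quoted_identifiers_py check_quoted_identifiers_py_alt
  have := outer_correspond text.toList text.toList.length 0 1 (by omega)
  simpa [nl] using this
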